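-- pv_equiv track=rewrite | github.com/Raj-m1705/Portfolio | app copy.py | suggest_pdfs
-- ===== SOURCE A (Python) =====
-- def suggest_pdfs(user_query):
--     """Basic keyword-based PDF suggestion. Replace with ML/embedding-based if needed."""
--     suggestions = []
--     keywords = {
--         "AI": ["Profile 1", "Profile 3"],
--         "Python": ["Profile 2"],
--         "Web": ["Profile 4"],
--         "Projects": ["Profile 3", "Profile 5"],
--         "Experience": ["Profile 1", "Profile 2"],
--     }
--     for key, pdfs in keywords.items():
--         if key.lower() in user_query.lower():
--             suggestions.extend(pdfs)
--     return list(set(suggestions))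
-- ===== SOURCE B (Python) =====
-- def suggest_pdfs(user_query):
--     """Profile-driven rewrite: each profile lists the keywords that imply it;
--     a profile is suggested when any of its keywords occurs in the query."""
--     profile_keywords = [
--         ("Profile 1", ["AI", "Experience"]),
--         ("Profile 2", ["Python", "Experience"]),
--         ("Profile 3", ["AI", "Projects"]),
--         ("Profile 4", ["Web"]),
--         ("Profile 5", ["Projects"]),
--     ]
--     q = user_query.lower()
--     return sorted({p for p, kws in profile_keywords
--                    if any(k.lower() in q for k in kws)})
-- ===== Notes on version B (the rewrite author's own statement) =====
-- stated objective: alternative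
-- what changed: Replaces the keyword-driven loop that extends a suggestion list and dedups it with list(set(...)) by an inverted profile->keywords table: each profile is tested once (any of its keywords in the query) and the matched profiles are returned as sorted(set(...)), a determinate order instead of hash order.
import Mathlib
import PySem

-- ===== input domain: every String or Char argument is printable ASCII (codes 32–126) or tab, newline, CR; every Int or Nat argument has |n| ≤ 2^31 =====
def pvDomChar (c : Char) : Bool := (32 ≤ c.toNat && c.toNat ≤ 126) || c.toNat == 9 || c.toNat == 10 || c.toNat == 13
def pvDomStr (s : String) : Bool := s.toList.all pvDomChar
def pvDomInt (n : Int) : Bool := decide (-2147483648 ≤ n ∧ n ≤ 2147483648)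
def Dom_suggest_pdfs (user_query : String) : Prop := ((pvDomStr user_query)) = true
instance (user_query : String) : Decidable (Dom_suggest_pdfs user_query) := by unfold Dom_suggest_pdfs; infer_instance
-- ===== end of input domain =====

-- B replaces A's keyword-driven extend-then-dedup loop by an inverted profile→keywords table
-- queried once per profile (alternative decomposition, not claimed faster). Python's
-- list(set(...)) iteration order is hash-seed dependent and the result is compared as a
-- finite set; both ports represent that set by its sorted element list.

-- ===== PORT A =====
def suggest_pdfs (user_query : String) : List String :=
  let keywords : List (String × List String) :=
    [("AI", ["Profile 1", "Profile 3"]),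
     ("Python", ["Profile 2"]),
     ("Web", ["Profile 4"]),
     ("Projects", ["Profile 3", "Profile 5"]),
     ("Experience", ["Profile 1", "Profile 2"])]
  let suggestions : List String :=
    keywords.foldl
      (fun acc kp =>
        if PySem.Str.isIn (PySem.Str.lower kp.1) (PySem.Str.lower user_query)
        then acc ++ kp.2 else acc) []
  -- list(set(suggestions)): the set's elements, in the determinate sorted order
  PySem.List.sorted (PySem.Set.ofList suggestions) (fun s => s) false

-- ===== PORT B =====
def suggest_pdfs_alt (user_query : String) : List String :=
  let profile_keywords : List (String × List String) :=
    [("Profile 1", ["AI", "Experience"]),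
     ("Profile 2", ["Python", "Experience"]),
     ("Profile 3", ["AI", "Projects"]),
     ("Profile 4", ["Web"]),
     ("Profile 5", ["Projects"])]
  let q := PySem.Str.lower user_query
  let matched : List String :=
    (profile_keywords.filter
      (fun pk => pk.2.any (fun k => PySem.Str.isIn (PySem.Str.lower k) q))).map Prod.fst
  -- sorted({...}): the set's elements in sorted order
  PySem.List.sorted (PySem.Set.ofList matched) (fun s => s) false

-- ===== PRECONDITION & SPEC =====
def Spec_suggest_pdfs (user_query : String) (out : List String) : Prop := out = suggest_pdfs_alt user_query
instance (user_query : String) (out : List String) : Decidable (Spec_suggest_pdfs user_query out) := by unfold Spec_suggest_pdfs; infer_instance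

-- ===== CLAIM (what is proved, stated in full; the proofs are below) =====
def Claim_equal_suggest_pdfs : Prop := ∀ (user_query : String), Dom_suggest_pdfs user_query → Spec_suggest_pdfs user_query (suggest_pdfs user_query)

-- ===== LEMMAS AND PROOFS =====

-- ===== VERDICT (by name: the statement is the Claim_ definition above) =====
theorem suggest_pdfs_spec : Claim_equal_suggest_pdfs := by
  intro q _
  unfold Spec_suggest_pdfs suggest_pdfs suggest_pdfs_alt
  cases h1 : PySem.Chars.isIn (PySem.Chars.lower ['A', 'I']) (PySem.Chars.lower q.toList) <;>
  cases h2 : PySem.Chars.isIn (PySem.Chars.lower ['P', 'y', 't', 'h', 'o', 'n']) (PySem.Chars.lower q.toList) <;>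
  cases h3 : PySem.Chars.isIn (PySem.Chars.lower ['W', 'e', 'b']) (PySem.Chars.lower q.toList) <;>
  cases h4 : PySem.Chars.isIn (PySem.Chars.lower ['P', 'r', 'o', 'j', 'e', 'c', 't', 's']) (PySem.Chars.lower q.toList) <;>
  cases h5 : PySem.Chars.isIn (PySem.Chars.lower ['E', 'x', 'p', 'e', 'r', 'i', 'e', 'n', 'c', 'e']) (PySem.Chars.lower q.toList) <;>
  simp [h1, h2, h3, h4, h5, List.foldl, List.filter, List.map, List.any,
        PySem.List.sorted, PySem.List.insertBy, PySem.Set.ofList, PySem.Set.add,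
        PySem.Set.contains] <;> decide
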